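-- pv_equiv track=rewrite | github.com/Aniketpatro11/crispr | streamlit_app.py | self_complementarity_score
-- ===== SOURCE A (Python) =====
-- def complement(b: str) -> str:
--     return {"A": "T", "T": "A", "G": "C", "C": "G"}.get(b, "N")
--
-- def rev_complement(seq: str) -> str:
--     return "".join(complement(b) for b in seq[::-1])
--
-- def self_complementarity_score(seq: str, window: int = 4) -> int:
--     # simple heuristic: count short reverse-complement windows that appear within the guide
--     score = 0
--     if len(seq) < window:
--         return 0
--     for i in range(len(seq) - window + 1):
--         w = seq[i:i + window]
--         if rev_complement(w) in seq:
--             score += 1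
--     return score
-- ===== SOURCE B (Python) =====
-- def complement(b: str) -> str:
--     return {"A": "T", "T": "A", "G": "C", "C": "G"}.get(b, "N")
--
-- def rev_complement(seq: str) -> str:
--     return "".join(complement(b) for b in seq[::-1])
--
-- def self_complementarity_score(seq: str, window: int = 4) -> int:
--     # reverse-complement the WHOLE sequence once; each window's reverse-complement
--     # is then a window of rc, so tally the distinct windows of rc and add the
--     # multiplicity of every tallied window that occurs in seq
--     rc = rev_complement(seq)
--     counts = {}
--     for j in range(len(rc) - window + 1):
--         w = rc[j:j + window]
--         counts[w] = counts.get(w, 0) + 1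
--     score = 0
--     for w, c in counts.items():
--         if w in seq:
--             score += c
--     return score
-- ===== Notes on version B (the rewrite author's own statement) =====
-- stated objective: faster
-- what changed: B reverse-complements the whole sequence once (each window's reverse-complement is a window of that string), tallies the occurrence counts of the distinct windows of the reverse-complement in a dict, and sums the counts of those that occur in seq, instead of A's per-position loop that builds a reverse-complement and runs a substring scan at every position.
-- outside the precondition, e.g. on self_complementarity_score('AAT', -1): A returns 4, B returns 5
import Mathlib
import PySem

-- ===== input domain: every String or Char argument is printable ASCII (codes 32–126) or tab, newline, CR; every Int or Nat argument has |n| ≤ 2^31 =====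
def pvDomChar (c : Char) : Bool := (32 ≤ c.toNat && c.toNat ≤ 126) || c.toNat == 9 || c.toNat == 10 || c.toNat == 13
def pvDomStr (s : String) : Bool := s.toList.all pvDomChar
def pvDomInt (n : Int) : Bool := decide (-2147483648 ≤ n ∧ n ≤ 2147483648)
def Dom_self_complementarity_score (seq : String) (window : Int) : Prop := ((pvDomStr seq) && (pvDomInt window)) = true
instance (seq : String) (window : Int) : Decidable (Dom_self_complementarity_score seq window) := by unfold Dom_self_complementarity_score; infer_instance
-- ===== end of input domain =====

-- B reverse-complements the whole sequence ONCE, tallies the multiplicities of the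
-- distinct windows of that reverse-complement in a dict, and runs one substring test
-- per DISTINCT window instead of A's per-position scan (objective: faster; the timing
-- run measured B much faster on large inputs).

-- ===== PORT A =====
-- complement(b): literal dict .get(b, "N") at the single-character level
def pvComplement (b : Char) : Char :=
  (PySem.Dict.ofList [('A', 'T'), ('T', 'A'), ('G', 'C'), ('C', 'G')]).getD b 'N'

-- rev_complement(seq): "".join(complement(b) for b in seq[::-1]); seq[::-1] is reverse
def pvRevComplement (s : List Char) : List Char := s.reverse.map pvComplement

def self_complementarity_score (seq : String) (window : Int) : Int :=
  let s := seq.toList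
  let score : Int := 0
  if (s.length : Int) < window then 0
  else
    (PySem.List.pyRange 0 ((s.length : Int) - window + 1) 1).foldl
      (fun score i =>
        let w := PySem.List.slice s (some i) (some (i + window))
        if PySem.Chars.isIn (pvRevComplement w) s then score + 1 else score) score

-- ===== PORT B =====
def self_complementarity_score_alt (seq : String) (window : Int) : Int :=
  let s := seq.toList
  let rc := pvRevComplement s
  let counts : PySem.Dict (List Char) Int :=
    (PySem.List.pyRange 0 ((rc.length : Int) - window + 1) 1).foldl
      (fun d j =>
        let w := PySem.List.slice rc (some j) (some (j + window))
        d.insert w (d.getD w 0 + 1)) PySem.Dict.empty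
  counts.items.foldl
    (fun score p => if PySem.Chars.isIn p.1 s then score + p.2 else score) 0

-- ===== PRECONDITION & SPEC =====
-- Pre_ restricts to the natural domain of a window LENGTH: it excludes negative
-- `window`, on which A still returns a value driven by Python's negative-slice
-- wraparound (seq[i:i+window] read backwards from the end), not a window count.
def Pre_self_complementarity_score (seq : String) (window : Int) : Prop := 0 ≤ window
instance (seq : String) (window : Int) : Decidable (Pre_self_complementarity_score seq window) := by unfold Pre_self_complementarity_score; infer_instance

def pvWitness_self_complementarity_score : String × Int := ("ACGT", 2)

def Spec_self_complementarity_score (seq : String) (window : Int) (out : Int) : Prop := out = self_complementarity_score_alt seq window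
instance (seq : String) (window : Int) (out : Int) : Decidable (Spec_self_complementarity_score seq window out) := by unfold Spec_self_complementarity_score; infer_instance

-- ===== CLAIM (what is proved, stated in full; the proofs are below) =====
def Claim_equal_self_complementarity_score : Prop := ∀ (seq : String) (window : Int), Dom_self_complementarity_score seq window → Pre_self_complementarity_score seq window → Spec_self_complementarity_score seq window (self_complementarity_score seq window)

-- ===== LEMMAS AND PROOFS =====

-- a sum of 'count if cond else 0' over a filtered map equals the plain mapped sum
lemma pv_sum_ite_eq_sum_filter {α : Type} (cond : α → Bool) (g : α → Nat) :
    ∀ L : List α,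
      (L.map (fun k => if cond k then (g k : Int) else 0)).sum
        = (((L.filter cond).map g).sum : Nat) := by
  intro L
  induction L with
  | nil => simp
  | cons x L ih =>
    by_cases h : cond x = true <;> simp [h, ih]

-- List.count does not depend on which (lawful) BEq instance is in scope
lemma pv_count_irrel {α : Type} [BEq α] [LawfulBEq α] [DecidableEq α] (k : α) (l : List α) :
    l.count k = @List.count α instBEqOfDecidableEq k l := by
  induction l with
  | nil => rfl
  | cons x t ih => by_cases h : x = k <;> simp [ih, h]

-- grouping: summing each distinct element's multiplicity (when cond holds) counts cond
lemma pv_grouped_count {α : Type} [BEq α] [LawfulBEq α] [DecidableEq α]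
    (cond : α → Bool) (xs : List α) :
    ((PySem.Set.ofList xs).map (fun k => if cond k then (xs.count k : Int) else 0)).sum
      = (xs.countP cond : Int) := by
  have hperm : (PySem.Set.ofList xs).Perm xs.dedup := by
    rw [List.perm_ext_iff_of_nodup (PySem.Set.nodup_ofList xs) xs.nodup_dedup]
    intro a; simp [PySem.Set.mem_ofList, List.mem_dedup]
  simp only [fun k => pv_count_irrel (α := α) k xs]
  rw [(hperm.map _).sum_eq, pv_sum_ite_eq_sum_filter]
  exact congrArg (fun n : Nat => (n : Int)) (List.sum_map_count_dedup_filter_eq_countP cond xs)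

-- B's two phases (counter over R.map F, then items fold) compute countP over R.map F
lemma pv_dict_side {ι : Type} (R : List ι) (F : ι → List Char) (cond : List Char → Bool) :
    (R.foldl (fun d i => d.insert (F i) (d.getD (F i) 0 + 1)) PySem.Dict.empty).items.foldl
        (fun sc p => if cond p.1 then sc + p.2 else sc) (0 : Int)
      = ((R.map F).countP cond : Int) := by
  have hC : R.foldl (fun d i => (d.insert (F i) (d.getD (F i) 0 + 1))) PySem.Dict.empty
      = PySem.Dict.counter (R.map F) := by
    rw [← List.foldl_map (f := F)
          (g := fun d w => PySem.Dict.insert d w (PySem.Dict.getD d w 0 + 1)),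
        PySem.Dict.foldl_insert_getD_add_one_eq_counter]
  rw [hC, PySem.Dict.items_counter]
  have hfun : (fun (sc : Int) (p : List Char × Int) => if cond p.1 then sc + p.2 else sc)
      = fun sc p => sc + (if cond p.1 then p.2 else 0) := by
    funext sc p; split <;> simp
  rw [hfun, PySem.List.foldl_add, zero_add, ← pv_grouped_count cond (R.map F), List.map_map]
  apply congrArg List.sum
  apply congrArg (List.map · (PySem.Set.ofList (R.map F)))
  funext k; by_cases h : cond k = true <;> simp [h]

-- the reverse of a window of s is the mirror window of s.reverse
lemma pv_rev_window (s : List Char) (k w : Nat) (h : k + w ≤ s.length) :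
    ((s.drop k).take w).reverse = (s.reverse.drop (s.length - w - k)).take w := by
  rw [List.reverse_take, List.reverse_drop, List.length_drop, List.drop_take]
  have h1 : s.length - k - (s.length - k - w) = w := by omega
  have h2 : s.length - k - w = s.length - w - k := by omega
  rw [h1, h2]

-- mapping over range backwards is the reverse
lemma pv_map_range_rev {α : Type} (g : Nat → α) (m : Nat) :
    ((List.range m).map g).reverse = (List.range m).map (fun k => g (m - 1 - k)) := by
  apply List.ext_getElem
  · simp
  · intro i h1 h2
    simp only [List.getElem_reverse, List.length_map, List.length_range,
      List.getElem_map, List.getElem_range]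

-- ===== VERDICT (by name: the statement is the Claim_ definition above) =====
theorem self_complementarity_score_spec : Claim_equal_self_complementarity_score := by
  intro seq window _ hpre
  unfold Spec_self_complementarity_score self_complementarity_score self_complementarity_score_alt
  dsimp only
  have hlen : (pvRevComplement seq.toList).length = seq.toList.length := by
    simp [pvRevComplement]
  rw [hlen]
  set s := seq.toList with hs
  by_cases hlt : (s.length : Int) < window
  · rw [if_pos hlt]
    rw [PySem.List.pyRange_one_eq_nil (by omega)]
    rfl
  · rw [if_neg hlt]
    obtain ⟨w, rfl⟩ : ∃ w : Nat, window = (w : Int) :=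
      ⟨window.toNat, (Int.toNat_of_nonneg hpre).symm⟩
    have hwn : w ≤ s.length := by exact_mod_cast not_lt.mp hlt
    have hb : (s.length : Int) - (w : Int) + 1 = ((s.length - w + 1 : Nat) : Int) := by omega
    rw [hb, PySem.List.pyRange_zero_natCast]
    set m := s.length - w + 1 with hm
    -- turn both folds over the cast range into folds over List.range m
    rw [List.foldl_map, List.foldl_map]
    -- B side: counter + items fold = countP over the mapped windows
    rw [pv_dict_side (List.range m)
        (fun (k : Nat) => PySem.List.slice (pvRevComplement s) (some (k : Int)) (some ((k : Int) + (w : Int))))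
        (fun x => PySem.Chars.isIn x s)]
    -- A side: counting fold = countP
    rw [PySem.List.foldl_if_add_one
        (fun (k : Nat) => PySem.Chars.isIn
          (pvRevComplement (PySem.List.slice s (some (k : Int)) (some ((k : Int) + (w : Int))))) s)
        (List.range m) 0, zero_add]
    -- reduce both sides to countP over List.range m and compare pointwise
    rw [List.countP_map]
    congr 1
    have hwin : ∀ k : Nat, k < m →
        pvRevComplement (PySem.List.slice s (some ((k : Nat) : Int)) (some (((k : Nat) : Int) + (w : Int))))
          = PySem.List.slice (pvRevComplement s) (some (((m - 1 - k : Nat) : Int))) (some (((m - 1 - k : Nat) : Int) + (w : Int))) := by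
      intro k hkm
      have hkw : k + w ≤ s.length := by omega
      rw [PySem.List.slice_natCast_add, PySem.List.slice_natCast_add]
      unfold pvRevComplement
      rw [← List.map_drop, ← List.map_take]
      refine congrArg (List.map pvComplement) ?_
      have hm1 : m - 1 - k = s.length - w - k := by omega
      rw [hm1]
      exact pv_rev_window s k w hkw
    have hmap : List.map (fun k => pvRevComplement (PySem.List.slice s (some ((k : Nat) : Int)) (some (((k : Nat) : Int) + (w : Int))))) (List.range m)
        = List.map (fun k => PySem.List.slice (pvRevComplement s) (some (((m - 1 - k : Nat) : Int))) (some (((m - 1 - k : Nat) : Int) + (w : Int)))) (List.range m) :=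
      List.map_congr_left (fun k hk => hwin k (List.mem_range.mp hk))
    calc
      List.countP (fun k => PySem.Chars.isIn (pvRevComplement (PySem.List.slice s (some ((k : Nat) : Int)) (some (((k : Nat) : Int) + (w : Int))))) s) (List.range m)
          = List.countP (fun x => PySem.Chars.isIn x s)
              (List.map (fun k => pvRevComplement (PySem.List.slice s (some ((k : Nat) : Int)) (some (((k : Nat) : Int) + (w : Int))))) (List.range m)) := by rw [List.countP_map]; rfl
      _ = List.countP (fun x => PySem.Chars.isIn x s)
              (List.map (fun k => PySem.List.slice (pvRevComplement s) (some (((m - 1 - k : Nat) : Int))) (some (((m - 1 - k : Nat) : Int) + (w : Int)))) (List.range m)) := by rw [hmap]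
      _ = List.countP (fun x => PySem.Chars.isIn x s)
              ((List.map (fun k => PySem.List.slice (pvRevComplement s) (some ((k : Nat) : Int)) (some (((k : Nat) : Int) + (w : Int)))) (List.range m)).reverse) := by
            rw [pv_map_range_rev]
      _ = List.countP (fun x => PySem.Chars.isIn x s)
              (List.map (fun k => PySem.List.slice (pvRevComplement s) (some ((k : Nat) : Int)) (some (((k : Nat) : Int) + (w : Int)))) (List.range m)) := List.countP_reverse
      _ = List.countP ((fun x => PySem.Chars.isIn x s) ∘ fun k => PySem.List.slice (pvRevComplement s) (some ((k : Nat) : Int)) (some (((k : Nat) : Int) + (w : Int)))) (List.range m) := List.countP_map
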